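-- pv_equiv track=rewrite | github.com/ZiyaoZh/btd6_api_processor | btd6_core/collection_event_service.py | _get_possible_instas
-- ===== SOURCE A (Python) =====
-- import math
--
-- def _get_possible_instas(insta_list: list[str], page: int) -> list[str]:
--     if not insta_list:
--         return []
--
--     total = len(insta_list)
--     quarter = math.ceil(0.25 * total)
--
--     n = page
--     s = 0
--     while quarter < n:
--         n -= quarter
--         s += 1
--
--     picks: list[str] = []
--     for i in range(4):
--         pos = (i + s + 4 * n) % total
--         picks.append(insta_list[pos])
--     return picks
-- ===== SOURCE B (Python) =====
-- def _get_possible_instas(insta_list: list[str], page: int) -> list[str]: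
--     if not insta_list:
--         return []
--     total = len(insta_list)
--     quarter = -(-total // 4)  # ceil(total / 4)
--     # closed form of the subtraction loop: s = number of quarter-steps, n = remainder
--     s = max((page - 1) // quarter, 0)
--     n = page - s * quarter
--     return [insta_list[(i + s + 4 * n) % total] for i in range(4)]
-- ===== Notes on version B (the rewrite author's own statement) =====
-- stated objective: alternative
-- what changed: The while-loop that repeatedly subtracts `quarter` from `page` is replaced by a closed-form floor division (s = max((page-1)//quarter, 0), n = page - s*quarter), and the picks loop becomes a comprehension.
import Mathlib
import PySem

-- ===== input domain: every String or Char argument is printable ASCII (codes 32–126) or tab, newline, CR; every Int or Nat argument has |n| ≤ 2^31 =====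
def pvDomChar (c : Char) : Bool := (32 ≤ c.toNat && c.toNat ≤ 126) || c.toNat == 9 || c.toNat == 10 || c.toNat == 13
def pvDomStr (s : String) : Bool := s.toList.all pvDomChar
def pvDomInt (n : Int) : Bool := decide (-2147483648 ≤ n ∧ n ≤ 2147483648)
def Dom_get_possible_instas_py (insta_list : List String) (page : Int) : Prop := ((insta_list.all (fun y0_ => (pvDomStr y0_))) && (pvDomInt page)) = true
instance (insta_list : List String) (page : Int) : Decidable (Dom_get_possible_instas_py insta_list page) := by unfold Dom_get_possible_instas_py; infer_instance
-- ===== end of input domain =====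

-- B replaces A's repeated-subtraction while-loop by a closed-form floor division (alternative algorithm, same measured cost).


-- ===== PORT A =====
-- the `while quarter < n: n -= quarter; s += 1` loop; terminates because 0 < quarter
def pvALoop (quarter : Int) (hq : 0 < quarter) (n s : Int) : Int × Int :=
  if quarter < n then pvALoop quarter hq (n - quarter) (s + 1) else (n, s)
termination_by n.toNat
decreasing_by omega

def get_possible_instas_py (insta_list : List String) (page : Int) : List String :=
  if h : insta_list = [] then []
  else
    let total : Int := insta_list.length
    -- math.ceil(0.25 * total) computed exactly: = (total + 3) // 4 for these list lengths
    let quarter : Int := PySem.Int.floordiv (total + 3) 4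
    have hq : 0 < quarter := by
      have : insta_list.length ≠ 0 := fun h0 => h (List.eq_nil_of_length_eq_zero h0)
      show 0 < PySem.Int.floordiv ((insta_list.length : Int) + 3) 4
      rw [PySem.Int.floordiv_eq_ediv_of_pos (by omega)]; omega
    let ns := pvALoop quarter hq page 0
    -- for i in range(4): picks.append(insta_list[(i + s + 4*n) % total]); index is always in range
    (PySem.List.pyRange 0 4 1).foldl
      (fun picks i =>
        picks ++ [(PySem.List.pyGet? insta_list (PySem.Int.mod (i + ns.2 + 4 * ns.1) total)).getD ""]) []

-- ===== PORT B =====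
def get_possible_instas_py_alt (insta_list : List String) (page : Int) : List String :=
  if insta_list = [] then []
  else
    let total : Int := insta_list.length
    let quarter : Int := -(PySem.Int.floordiv (-total) 4)
    let s : Int := max (PySem.Int.floordiv (page - 1) quarter) 0
    let n : Int := page - s * quarter
    (PySem.List.pyRange 0 4 1).map
      (fun i => (PySem.List.pyGet? insta_list (PySem.Int.mod (i + s + 4 * n) total)).getD "")

-- ===== PRECONDITION & SPEC =====
def Spec_get_possible_instas_py (insta_list : List String) (page : Int) (out : List String) : Prop := out = get_possible_instas_py_alt insta_list page
instance (insta_list : List String) (page : Int) (out : List String) : Decidable (Spec_get_possible_instas_py insta_list page out) := by unfold Spec_get_possible_instas_py; infer_instance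

-- ===== CLAIM (what is proved, stated in full; the proofs are below) =====
def Claim_equal_get_possible_instas_py : Prop := ∀ (insta_list : List String) (page : Int), Dom_get_possible_instas_py insta_list page → Spec_get_possible_instas_py insta_list page (get_possible_instas_py insta_list page)

-- ===== LEMMAS AND PROOFS =====

-- the subtraction loop computes the floor-division closed form
theorem pvALoop_eq (quarter : Int) (hq : 0 < quarter) (n s : Int) :
    pvALoop quarter hq n s =
      (n - (max (PySem.Int.floordiv (n - 1) quarter) 0) * quarter,
       s + max (PySem.Int.floordiv (n - 1) quarter) 0) := by
  fun_induction pvALoop quarter hq n s with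
  | case1 n s hlt ih =>
    rw [ih]
    rw [PySem.Int.floordiv_eq_ediv_of_pos hq, PySem.Int.floordiv_eq_ediv_of_pos hq]
    have h1 : (n - quarter - 1) / quarter = (n - 1) / quarter - 1 := by
      have := Int.add_mul_ediv_right (n - 1) (-1) (by omega : quarter ≠ 0)
      have he : n - quarter - 1 = n - 1 + -1 * quarter := by ring
      rw [he]; omega
    have h2 : 1 ≤ (n - 1) / quarter := by
      have := Int.le_ediv_iff_mul_le (a := (1:Int)) (b := n - 1) hq
      omega
    rw [h1, max_eq_left (by omega : (0:Int) ≤ (n - 1) / quarter - 1),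
        max_eq_left (by omega : (0:Int) ≤ (n - 1) / quarter)]
    simp only [Prod.mk.injEq]
    exact ⟨by ring, by ring⟩
  | case2 n s hlt =>
    have h0 : (n - 1) / quarter < 1 := by
      rw [Int.ediv_lt_iff_lt_mul hq]; omega
    rw [PySem.Int.floordiv_eq_ediv_of_pos hq,
        max_eq_right (by omega : (n - 1) / quarter ≤ 0)]
    simp

theorem get_possible_instas_py_spec : Claim_equal_get_possible_instas_py := by
  intro insta_list page _
  unfold Spec_get_possible_instas_py get_possible_instas_py get_possible_instas_py_alt
  by_cases h : insta_list = []
  · simp [h]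
  · simp only [h, dite_false, if_false]
    have hlen : 1 ≤ (insta_list.length : Int) := by
      have : insta_list.length ≠ 0 := fun h0 => h (List.eq_nil_of_length_eq_zero h0)
      omega
    have hquarter : PySem.Int.floordiv ((insta_list.length : Int) + 3) 4
        = -(PySem.Int.floordiv (-(insta_list.length : Int)) 4) := by
      rw [PySem.Int.floordiv_eq_ediv_of_pos (by omega : (0:Int) < 4),
          PySem.Int.floordiv_eq_ediv_of_pos (by omega : (0:Int) < 4)]
      omega
    rw [pvALoop_eq, hquarter,
        show PySem.List.pyRange 0 4 1 = [0, 1, 2, 3] from by decide]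
    simp
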